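-- pv_equiv track=rewrite | github.com/Yagayev/RL-environment-for-Tetris-Battle | neural.py | make_decimal
-- ===== SOURCE A (Python) =====
-- def make_decimal(vec):
--     ans = 0
--     revVec = reversed(vec)
--     pos = 0
--     for member in revVec:
--         ans = ans + member* pow(2, pos)
--         pos += 1
--     return ans
-- ===== SOURCE B (Python) =====
-- def make_decimal(vec):
--     ans = 0
--     for member in vec:
--         ans = ans * 2 + member
--     return ans
-- ===== Notes on version B (the rewrite author's own statement) =====
-- stated objective: simpler
-- what changed: Replaces the reversed-iteration positional power sum (pos counter plus a fresh pow(2,pos) per element) with a single forward-order Horner recurrence ans = ans*2 + member.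
import Mathlib
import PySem

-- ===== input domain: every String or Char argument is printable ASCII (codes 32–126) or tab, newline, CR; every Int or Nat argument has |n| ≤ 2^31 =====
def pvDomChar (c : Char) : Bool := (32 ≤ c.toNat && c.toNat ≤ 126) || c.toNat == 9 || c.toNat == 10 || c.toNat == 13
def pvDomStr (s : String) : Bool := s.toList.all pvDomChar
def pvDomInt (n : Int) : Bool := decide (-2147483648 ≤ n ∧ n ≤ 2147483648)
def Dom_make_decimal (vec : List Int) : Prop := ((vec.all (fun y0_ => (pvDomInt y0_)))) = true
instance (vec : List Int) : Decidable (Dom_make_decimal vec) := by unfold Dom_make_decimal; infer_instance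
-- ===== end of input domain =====

-- B replaces A's reversed-iteration power sum with a forward Horner recurrence (simpler, same results).


-- ===== PORT A =====
-- ans = 0; pos = 0; for member in reversed(vec): ans += member * pow(2, pos); pos += 1
def make_decimal (vec : List Int) : Int :=
  (vec.reverse.foldl (fun (st : Int × Nat) member =>
      (st.1 + member * (2 : Int) ^ st.2, st.2 + 1)) (0, 0)).1

-- ===== PORT B =====
-- ans = 0; for member in vec: ans = ans * 2 + member
def make_decimal_alt (vec : List Int) : Int :=
  vec.foldl (fun ans member => ans * 2 + member) 0

-- ===== PRECONDITION & SPEC =====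
def Spec_make_decimal (vec : List Int) (out : Int) : Prop := out = make_decimal_alt vec
instance (vec : List Int) (out : Int) : Decidable (Spec_make_decimal vec out) := by unfold Spec_make_decimal; infer_instance

-- ===== CLAIM (what is proved, stated in full; the proofs are below) =====
def Claim_equal_make_decimal : Prop := ∀ (vec : List Int), Dom_make_decimal vec → Spec_make_decimal vec (make_decimal vec)

-- ===== LEMMAS AND PROOFS =====

-- little-endian value of a list
def pvLE : List Int → Int
  | [] => 0
  | m :: l => m + 2 * pvLE l

theorem pvLE_append (l : List Int) (m : Int) :
    pvLE (l ++ [m]) = pvLE l + m * (2 : Int) ^ l.length := by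
  induction l with
  | nil => simp [pvLE]
  | cons x l ih => simp [pvLE, ih, pow_succ]; ring

theorem makeA_foldl (l : List Int) (a : Int) (p : Nat) :
    (l.foldl (fun (st : Int × Nat) member =>
      (st.1 + member * (2 : Int) ^ st.2, st.2 + 1)) (a, p)).1 = a + pvLE l * (2 : Int) ^ p := by
  induction l generalizing a p with
  | nil => simp [pvLE]
  | cons m l ih => simp [List.foldl, ih, pvLE, pow_succ]; ring

theorem makeB_foldl (l : List Int) (a : Int) :
    l.foldl (fun ans member => ans * 2 + member) a = a * (2 : Int) ^ l.length + pvLE l.reverse := by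
  induction l generalizing a with
  | nil => simp [pvLE]
  | cons m l ih =>
    simp [List.foldl, ih, pvLE_append, pow_succ]; ring

-- ===== VERDICT (by name: the statement is the Claim_ definition above) =====
theorem make_decimal_spec : Claim_equal_make_decimal := by
  intro vec _
  unfold Spec_make_decimal make_decimal make_decimal_alt
  rw [makeA_foldl, makeB_foldl]
  simp
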